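-- pv_equiv track=rewrite | github.com/ambuda-org/ambuda | ambuda/seed/gretil.py | iter_line_groups
-- ===== SOURCE A (Python) =====
-- def iter_line_groups(lines):
--     buf = []
--     for line in lines:
--         if line:
--             buf.append(line.strip())
--         elif buf:
--             yield buf
--             buf = []
--     if buf:
--         yield buf
-- ===== SOURCE B (Python) =====
-- def iter_line_groups(lines):
--     lines = list(lines)
--     n, i = len(lines), 0
--     while i < n:
--         if not lines[i]:
--             i += 1
--             continue
--         j = i
--         while j < n and lines[j]:
--             j += 1
--         yield [line.strip() for line in lines[i:j]]
--         i = j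
-- ===== Notes on version B (the rewrite author's own statement) =====
-- stated objective: alternative
-- what changed: Replaces A's buffer-append-and-flush generator with an index scan that skips blank lines and, at each non-empty line, takes the whole maximal run at once and yields its stripped slice.
import Mathlib
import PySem

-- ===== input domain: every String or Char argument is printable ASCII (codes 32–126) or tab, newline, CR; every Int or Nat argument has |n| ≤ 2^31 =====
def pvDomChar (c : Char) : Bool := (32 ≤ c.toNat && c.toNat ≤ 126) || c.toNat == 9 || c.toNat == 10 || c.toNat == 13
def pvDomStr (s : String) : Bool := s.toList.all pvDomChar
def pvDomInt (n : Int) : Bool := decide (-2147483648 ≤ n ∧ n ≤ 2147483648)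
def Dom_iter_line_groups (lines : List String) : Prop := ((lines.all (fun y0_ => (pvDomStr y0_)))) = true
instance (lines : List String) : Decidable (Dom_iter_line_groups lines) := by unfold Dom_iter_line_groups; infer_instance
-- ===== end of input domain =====

-- B replaces A's buffer-append-and-flush loop by an index/run scan (take the whole
-- maximal non-empty run at once); alternative decomposition, same cost.


-- ===== PORT A =====
-- one step of A's for-loop: state is (buf, out); yields are collected in out
def pvStepA (st : List String × List (List String)) (line : String) :
    List String × List (List String) :=
  if line ≠ "" then (st.1 ++ [PySem.Str.strip line], st.2)
  else if st.1 ≠ [] then ([], st.2 ++ [st.1])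
  else st

def iter_line_groups (lines : List String) : List (List String) :=
  let st := lines.foldl pvStepA ([], [])
  if st.1 ≠ [] then st.2 ++ [st.1] else st.2

-- ===== PORT B =====
-- B's outer while-loop: skip a blank line, or take the maximal non-empty run
-- starting here (the inner `while j < n and lines[j]` = takeWhile/dropWhile),
-- emit its stripped copy, and continue after the run.
def iter_line_groups_alt (lines : List String) : List (List String) :=
  match lines with
  | [] => []
  | l :: ls =>
    if l = "" then iter_line_groups_alt ls
    else
      ((l :: ls.takeWhile (fun x => x ≠ "")).map PySem.Str.strip) ::
        iter_line_groups_alt (ls.dropWhile (fun x => x ≠ ""))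
termination_by lines.length
decreasing_by
  · simp
  · have := List.length_dropWhile_le (fun x => decide ¬x = "") ls
    simp at this ⊢; omega

-- ===== PRECONDITION & SPEC =====
def Spec_iter_line_groups (lines : List String) (out : List (List String)) : Prop := out = iter_line_groups_alt lines
instance (lines : List String) (out : List (List String)) : Decidable (Spec_iter_line_groups lines out) := by unfold Spec_iter_line_groups; infer_instance

-- ===== CLAIM (what is proved, stated in full; the proofs are below) =====
def Claim_equal_iter_line_groups : Prop := ∀ (lines : List String), Dom_iter_line_groups lines → Spec_iter_line_groups lines (iter_line_groups lines)

-- ===== LEMMAS AND PROOFS =====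

-- the rest of A's run, as a function of the current buffer and remaining lines
def resAux (buf : List String) : List String → List (List String)
  | [] => if buf ≠ [] then [buf] else []
  | l :: ls =>
    if l ≠ "" then resAux (buf ++ [PySem.Str.strip l]) ls
    else if buf ≠ [] then buf :: resAux [] ls
    else resAux [] ls

theorem foldA_resAux (lines : List String) (buf : List String)
    (out : List (List String)) :
    (let st := lines.foldl pvStepA (buf, out)
     if st.1 ≠ [] then st.2 ++ [st.1] else st.2) = out ++ resAux buf lines := by
  induction lines generalizing buf out with
  | nil =>
    simp only [List.foldl_nil, resAux]
    split <;> simp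
  | cons l ls ih =>
    simp only [List.foldl_cons, resAux, pvStepA]
    by_cases hl : l = ""
    · simp only [hl, ne_eq, not_true_eq_false, ite_false]
      by_cases hb : buf = []
      · simp [hb, ih]
      · simp only [hb, not_false_eq_true, if_pos]
        rw [ih]
        simp
    · simp only [hl, ne_eq, not_false_eq_true, if_pos]
      rw [ih]

-- pushing a run of non-empty lines into the buffer
theorem resAux_run (run : List String) (buf rest : List String)
    (h : ∀ x ∈ run, x ≠ "") :
    resAux buf (run ++ rest) = resAux (buf ++ run.map PySem.Str.strip) rest := by
  induction run generalizing buf with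
  | nil => simp
  | cons a t ih =>
    have ha : a ≠ "" := h a (by simp)
    simp only [List.cons_append, resAux, ha, ne_eq, not_false_eq_true, if_pos]
    rw [ih _ (fun x hx => h x (by simp [hx]))]
    simp

-- dropWhile leaves [] or a list whose head fails the predicate
theorem dropWhile_head (p : String → Bool) (ls : List String) :
    ls.dropWhile p = [] ∨
      ∃ a rs, ls.dropWhile p = a :: rs ∧ p a = false := by
  induction ls with
  | nil => exact Or.inl rfl
  | cons a t ih =>
    by_cases hp : p a
    · simpa [List.dropWhile, hp] using ih
    · exact Or.inr ⟨a, t, by simp [List.dropWhile, hp], by simpa using hp⟩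

-- flushing a nonempty buffer when the rest starts blank (or is empty)
theorem resAux_flush (buf rest : List String) (hb : buf ≠ [])
    (h : rest = [] ∨ ∃ a rs, rest = a :: rs ∧ a = "") :
    resAux buf rest = buf :: resAux [] rest := by
  rcases h with h | ⟨a, rs, h, ha⟩
  · simp [h, resAux, hb]
  · subst h; subst ha
    simp [resAux, hb]

theorem resAux_alt (lines : List String) :
    resAux [] lines = iter_line_groups_alt lines := by
  induction hn : lines.length using Nat.strong_induction_on generalizing lines with
  | _ n ih =>
  match lines with
  | [] => simp [resAux, iter_line_groups_alt]
  | l :: ls =>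
    by_cases hl : l = ""
    · subst hl
      have h0 : resAux ([] : List String) ("" :: ls) = resAux [] ls := by
        simp [resAux]
      rw [iter_line_groups_alt, h0, ih ls.length (by simp [← hn]) ls rfl]
      simp
    · rw [iter_line_groups_alt]
      simp only [if_neg hl]
      set p : String → Bool := fun x => x ≠ "" with hp
      have hsplit : ls.takeWhile p ++ ls.dropWhile p = ls := List.takeWhile_append_dropWhile
      have hrun : ∀ x ∈ ls.takeWhile p, x ≠ "" := by
        intro x hx
        have := List.mem_takeWhile_imp hx
        simpa [hp] using this
      have h1 : resAux ([] : List String) (l :: ls)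
          = resAux [PySem.Str.strip l] ls := by
        simp [resAux, hl]
      rw [h1, ← hsplit, resAux_run _ _ _ hrun]
      have hhead := dropWhile_head p ls
      have hflush : resAux ([PySem.Str.strip l] ++ (ls.takeWhile p).map PySem.Str.strip)
            (ls.dropWhile p)
          = ([PySem.Str.strip l] ++ (ls.takeWhile p).map PySem.Str.strip)
              :: resAux [] (ls.dropWhile p) := by
        apply resAux_flush _ _ (by simp)
        rcases hhead with h | ⟨a, rs, heq, hfa⟩
        · exact Or.inl h
        · exact Or.inr ⟨a, rs, heq, by simpa [hp] using hfa⟩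
      rw [hflush]
      have hlen : (ls.dropWhile p).length < n := by
        have := List.length_dropWhile_le p ls
        simp [← hn]; omega
      rw [ih _ hlen _ rfl]
      simp

-- ===== VERDICT (by name: the statement is the Claim_ definition above) =====
theorem iter_line_groups_spec : Claim_equal_iter_line_groups := by
  intro lines _
  unfold Spec_iter_line_groups iter_line_groups
  have := foldA_resAux lines [] []
  simp only [List.nil_append] at this
  rw [this, resAux_alt]
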